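-- pv_equiv track=rewrite | github.com/vicious987/old_uni_assignments | python_basic/l11/zad4/zad4.py | ppn
-- ===== SOURCE A (Python) =====
-- def ppn(word):
--     d = dict()
--     k = 1
--     for letter in word:
--         if letter not in d:
--             d[letter] = k
--             k += 1
--     word = list("-".join(word))
--     for index, letter in enumerate(word):
--         if letter != "-":
--             word[index] = str(d[word[index]])
--     return "".join(word)
-- ===== SOURCE B (Python) =====
-- def ppn(word):
--     d = {}
--     return "-".join(str(d.setdefault(c, len(d) + 1)) for c in word)
-- ===== Notes on version B (the rewrite author's own statement) =====
-- stated objective: simpler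
-- what changed: Single pass with dict.setdefault assigning 1-based first-appearance indices and joining the numbers with '-' directly, instead of A's separate table-building loop followed by interspersing dashes and rewriting the interleaved character list in place.
-- outside the precondition, e.g. on ppn('a-b'): A returns '1---3', B returns '1-2-3'; on ppn('-'): A returns '-', B returns '1'
import Mathlib
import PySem

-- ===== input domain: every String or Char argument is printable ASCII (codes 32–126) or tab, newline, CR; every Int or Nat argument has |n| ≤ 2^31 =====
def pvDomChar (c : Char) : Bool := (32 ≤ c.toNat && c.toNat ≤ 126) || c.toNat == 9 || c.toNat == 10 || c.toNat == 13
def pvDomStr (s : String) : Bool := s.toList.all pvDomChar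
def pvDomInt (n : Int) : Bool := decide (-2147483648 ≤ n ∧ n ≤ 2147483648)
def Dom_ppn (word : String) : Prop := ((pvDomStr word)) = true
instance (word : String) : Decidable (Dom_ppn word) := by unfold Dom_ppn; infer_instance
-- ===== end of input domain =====

-- B re-implements A in one pass via dict.setdefault (simpler decomposition, same cost);
-- equivalence is claimed for words without '-', where A's separator collides with a word character.

-- ===== PORT A =====
-- Python's 'for letter in word' yields one-character strings; the dict is keyed by them.
def pvS (c : Char) : String := String.ofList [c]

def ppn (word : String) : String :=
  -- d = dict(); k = 1; for letter in word: if letter not in d: d[letter] = k; k += 1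
  let st := word.toList.foldl
    (fun (st : PySem.Dict String Int × Int) letter =>
      if st.1.contains (pvS letter) = false then (st.1.insert (pvS letter) st.2, st.2 + 1) else st)
    (PySem.Dict.empty, 1)
  -- word = list("-".join(word))
  let w1 : List String := (PySem.Str.join "-" (word.toList.map pvS)).toList.map pvS
  -- for index, letter in enumerate(word): if letter != "-": word[index] = str(d[word[index]])
  -- (word[index] is read before the write at the same index, so it equals the enumerate
  --  value p.2; enumerate indices are nonnegative and in range, so .toNat is exact; the
  --  d[...] lookup is ported as getD — its key is always present, so the default is dead)
  let w2 := (PySem.List.enumerate w1).foldl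
    (fun (w : List String) p =>
      if p.2 ≠ "-" then w.set p.1.toNat (PySem.Int.toStr (st.1.getD p.2 0)) else w)
    w1
  -- return "".join(word)
  PySem.Str.join "" w2

-- ===== PORT B =====
def ppn_alt (word : String) : String :=
  -- d = {}; return "-".join(str(d.setdefault(c, len(d) + 1)) for c in word)
  -- (setdefault returns the stored value: (get? c).getD (len+1), with len read before insertion)
  let r := word.toList.foldl
    (fun (st : PySem.Dict String Int × List String) c =>
      (st.1.setdefault (pvS c) ((st.1.size : Int) + 1),
       st.2 ++ [PySem.Int.toStr ((st.1.get? (pvS c)).getD ((st.1.size : Int) + 1))]))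
    (PySem.Dict.empty, [])
  PySem.Str.join "-" r.2

-- ===== PRECONDITION & SPEC =====
-- Pre_ excludes words containing '-': there the encoded letter collides with the join
-- separator, an unspecified corner — A leaves such dashes unencoded (while still assigning
-- them an index), B encodes them like any other character; both are defensible.
def Pre_ppn (word : String) : Prop := '-' ∉ word.toList
instance (word : String) : Decidable (Pre_ppn word) := by unfold Pre_ppn; infer_instance
def pvWitness_ppn : String := "abacabad"

def Spec_ppn (word : String) (out : String) : Prop := out = ppn_alt word
instance (word : String) (out : String) : Decidable (Spec_ppn word out) := by unfold Spec_ppn; infer_instance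

-- ===== CLAIM (what is proved, stated in full; the proofs are below) =====
def Claim_equal_ppn : Prop := ∀ (word : String), Dom_ppn word → Pre_ppn word → Spec_ppn word (ppn word)

-- ===== LEMMAS AND PROOFS =====

theorem pvS_dash : pvS '-' = "-" := by
  apply String.toList_inj.mp; simp [pvS]

theorem pvS_ne_dash {c : Char} (h : c ≠ '-') : pvS c ≠ "-" := by
  intro hc
  have := congrArg String.toList hc
  simp [pvS] at this
  exact h this

-- A's dict-building fold equals B's setdefault fold, with k = size + 1 as the invariant.
theorem dict_eq : ∀ (cs : List Char) (d : PySem.Dict String Int),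
    cs.foldl
      (fun (st : PySem.Dict String Int × Int) letter =>
        if st.1.contains (pvS letter) = false then (st.1.insert (pvS letter) st.2, st.2 + 1) else st)
      (d, (d.size : Int) + 1)
    = (cs.foldl (fun d c => d.setdefault (pvS c) ((d.size : Int) + 1)) d,
       ((cs.foldl (fun d c => d.setdefault (pvS c) ((d.size : Int) + 1)) d).size : Int) + 1) := by
  intro cs
  induction cs with
  | nil => intro d; simp
  | cons c cs ih =>
    intro d
    simp only [List.foldl_cons]
    cases h : d.contains (pvS c) with
    | false =>
      rw [PySem.Dict.setdefault_of_not_contains _ _ h]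
      rw [if_pos rfl]
      have hs : ((d.insert (pvS c) ((d.size : Int) + 1)).size : Int) = (d.size : Int) + 1 := by
        rw [PySem.Dict.size_insert, if_neg (by simp [h])]; push_cast; ring
      have h2 := ih (d.insert (pvS c) ((d.size : Int) + 1))
      rw [hs] at h2
      exact h2
    | true =>
      rw [PySem.Dict.setdefault_of_contains _ _ h]
      simp only [Bool.true_eq_false, if_false]
      exact ih d

-- values already present survive the rest of B's dict fold
theorem dict_pres : ∀ (cs : List Char) (d : PySem.Dict String Int) (s : String) (v : Int),
    d.get? s = some v →
    (cs.foldl (fun d c => d.setdefault (pvS c) ((d.size : Int) + 1)) d).get? s = some v := by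
  intro cs
  induction cs with
  | nil => intro d s v h; simpa using h
  | cons c cs ih =>
    intro d s v h
    simp only [List.foldl_cons]
    apply ih
    by_cases hs : s = pvS c
    · subst hs
      rw [PySem.Dict.get?_setdefault_self, h]
      rfl
    · rw [PySem.Dict.get?_setdefault_of_ne _ _ hs]
      exact h

-- B's accumulated output, described via B's final dict
theorem b_acc : ∀ (cs : List Char) (d : PySem.Dict String Int) (acc : List String),
    (cs.foldl
      (fun (st : PySem.Dict String Int × List String) c =>
        (st.1.setdefault (pvS c) ((st.1.size : Int) + 1),
         st.2 ++ [PySem.Int.toStr ((st.1.get? (pvS c)).getD ((st.1.size : Int) + 1))]))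
      (d, acc)).2
    = acc ++ cs.map (fun c => PySem.Int.toStr
        ((cs.foldl (fun d c => d.setdefault (pvS c) ((d.size : Int) + 1)) d).getD (pvS c) 0)) := by
  intro cs
  induction cs with
  | nil => intro d acc; simp
  | cons c cs ih =>
    intro d acc
    simp only [List.foldl_cons, List.map_cons]
    rw [ih]
    have hv : (cs.foldl (fun d c => d.setdefault (pvS c) ((d.size : Int) + 1))
        (d.setdefault (pvS c) ((d.size : Int) + 1))).get? (pvS c)
        = some ((d.get? (pvS c)).getD ((d.size : Int) + 1)) :=
      dict_pres cs _ _ _ (PySem.Dict.get?_setdefault_self d _ _)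
    rw [PySem.Dict.getD_of_get?_eq_some _ _ hv]
    simp

-- the dash-join of singleton strings is an intersperse
theorem join_sing : ∀ (cs : List Char),
    PySem.Chars.join ['-'] (cs.map (fun c => [c])) = List.intersperse '-' cs
  | [] => by simp [PySem.Chars.join_nil, List.intersperse]
  | [c] => by simp [PySem.Chars.join_singleton, List.intersperse]
  | c :: c' :: cs => by
    have ih := join_sing (c' :: cs)
    simp only [List.map_cons] at ih ⊢
    rw [PySem.Chars.join_cons_cons, ih]
    simp [List.intersperse]

theorem join_singletons (cs : List Char) :
    (PySem.Str.join "-" (cs.map pvS)).toList = List.intersperse '-' cs := by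
  rw [PySem.Str.toList_join]
  have : (cs.map pvS).map String.toList = cs.map (fun c => [c]) := by
    simp [pvS]
  rw [this, show ("-" : String).toList = ['-'] by simp, join_sing]

theorem map_intersperse' {α β : Type} (f : α → β) (a : α) :
    ∀ (l : List α), (List.intersperse a l).map f = List.intersperse (f a) (l.map f)
  | [] => by simp
  | [x] => by simp [List.intersperse]
  | x :: y :: t => by
    have ih := map_intersperse' f a (y :: t)
    rw [show List.intersperse a (x :: y :: t) = x :: a :: List.intersperse a (y :: t) from by
      cases t <;> simp [List.intersperse]]
    simp only [List.map_cons]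
    rw [ih]
    rw [show List.intersperse (f a) (f x :: f y :: t.map f)
        = f x :: f a :: List.intersperse (f a) (f y :: t.map f) from by
      cases t <;> simp [List.intersperse]]
    simp

-- joining with "" after interspersing ['-'] is joining with ['-']
theorem ji' : ∀ (L : List (List Char)),
    PySem.Chars.join [] (List.intersperse ['-'] L) = PySem.Chars.join ['-'] L
  | [] => by simp [PySem.Chars.join_nil, List.intersperse]
  | [p] => by simp [List.intersperse, PySem.Chars.join_singleton]
  | p :: q :: R => by
    have ih := ji' (q :: R)
    obtain ⟨z, zs, hz⟩ : ∃ z zs, List.intersperse ['-'] (q :: R) = z :: zs := by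
      cases R with
      | nil => exact ⟨q, [], by simp [List.intersperse]⟩
      | cons r R' => exact ⟨q, ['-'] :: List.intersperse ['-'] (r :: R'), by simp [List.intersperse]⟩
    rw [show List.intersperse ['-'] (p :: q :: R) = p :: ['-'] :: List.intersperse ['-'] (q :: R) from by
      cases R <;> simp [List.intersperse]]
    rw [hz, PySem.Chars.join_cons_cons, PySem.Chars.join_cons_cons, ← hz, ih,
      PySem.Chars.join_cons_cons]
    simp

theorem join_intersperse (l : List String) :
    PySem.Str.join "" (List.intersperse "-" l) = PySem.Str.join "-" l := by
  apply String.toList_inj.mp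
  rw [PySem.Str.toList_join, PySem.Str.toList_join]
  rw [map_intersperse' String.toList "-"]
  rw [show ("-" : String).toList = ['-'] by simp, show ("" : String).toList = [] by simp]
  exact ji' (l.map String.toList)

-- the enumerate/set fold is a map (invariant: positions ≥ n still hold the original values)
theorem fold_set_aux (f : String → String) :
    ∀ (l w : List String) (n : Nat), w.drop n = l →
    (PySem.List.enumerate l (n : Int)).foldl
      (fun (w : List String) p => if p.2 ≠ "-" then w.set p.1.toNat (f p.2) else w) w
    = w.take n ++ l.map (fun s => if s ≠ "-" then f s else s) := by
  intro l
  induction l with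
  | nil =>
    intro w n h
    rw [PySem.List.enumerate_nil, List.foldl_nil, List.map_nil, List.append_nil,
      List.take_of_length_le (List.drop_eq_nil_iff.mp h)]
  | cons x l ih =>
    intro w n h
    rw [PySem.List.enumerate_cons, List.foldl_cons]
    have hget : w[n]? = some x := by
      have h0 : (w.drop n)[0]? = some x := by rw [h]; rfl
      rw [List.getElem?_drop] at h0
      simpa using h0
    have hlen : n < w.length := by
      have := List.getElem?_eq_some_iff.mp hget
      exact this.1
    have hdrop1 : w.drop (n + 1) = l := by
      have h1 : (w.drop n).drop 1 = l := by rw [h]; rfl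
      rwa [List.drop_drop] at h1
    by_cases hx : x = "-"
    · subst hx
      rw [if_neg (by simp)]
      have h2 := ih w (n + 1) hdrop1
      rw [Nat.cast_add, Nat.cast_one] at h2
      rw [h2, List.take_add_one, hget]
      simp
    · rw [if_pos hx, Int.toNat_natCast]
      have hd : (w.set n (f x)).drop (n + 1) = l := by
        rw [List.drop_set, if_pos (by omega), hdrop1]
      have h2 := ih (w.set n (f x)) (n + 1) hd
      rw [Nat.cast_add, Nat.cast_one] at h2
      rw [h2, List.take_add_one]
      have hset : (w.set n (f x))[n]? = some (f x) := by
        rw [List.getElem?_set, if_pos rfl, if_pos hlen]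
      have htake : (w.set n (f x)).take n = w.take n := by
        apply List.ext_getElem?
        intro j
        rw [List.getElem?_take, List.getElem?_take]
        by_cases hj : j < n
        · rw [if_pos hj, if_pos hj, List.getElem?_set, if_neg (by omega)]
        · rw [if_neg hj, if_neg hj]
      rw [hset, htake]
      simp [hx]

theorem fold_set_map (D : PySem.Dict String Int) (l : List String) :
    (PySem.List.enumerate l).foldl
      (fun (w : List String) p =>
        if p.2 ≠ "-" then w.set p.1.toNat (PySem.Int.toStr (D.getD p.2 0)) else w) l
    = l.map (fun s => if s ≠ "-" then PySem.Int.toStr (D.getD s 0) else s) := by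
  have h := fold_set_aux (fun s => PySem.Int.toStr (D.getD s 0)) l l 0 rfl
  simpa using h

-- A's whole second phase, as one rewrite
theorem a_chain (D : PySem.Dict String Int) (cs : List Char) (h : '-' ∉ cs) :
    PySem.Str.join "" (((PySem.Str.join "-" (cs.map pvS)).toList.map pvS).map
        (fun s => if s ≠ "-" then PySem.Int.toStr (D.getD s 0) else s))
    = PySem.Str.join "-" (cs.map (fun c => PySem.Int.toStr (D.getD (pvS c) 0))) := by
  rw [join_singletons, List.map_map, map_intersperse']
  have hsep : ((fun s => if s ≠ "-" then PySem.Int.toStr (D.getD s 0) else s) ∘ pvS) '-' = "-" := by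
    simp [Function.comp, pvS_dash]
  rw [hsep]
  have hmap : cs.map ((fun s => if s ≠ "-" then PySem.Int.toStr (D.getD s 0) else s) ∘ pvS)
      = cs.map (fun c => PySem.Int.toStr (D.getD (pvS c) 0)) := by
    apply List.map_congr_left
    intro c hc
    have : pvS c ≠ "-" := pvS_ne_dash (fun e => h (e ▸ hc))
    simp [Function.comp, this]
  rw [hmap, join_intersperse]

-- ===== VERDICT (by name: the statement is the Claim_ definition above) =====
theorem ppn_spec : Claim_equal_ppn := by
  intro word _dom hpre
  unfold Spec_ppn
  simp only [ppn, ppn_alt]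
  have hd := dict_eq word.toList PySem.Dict.empty
  rw [show (((PySem.Dict.empty : PySem.Dict String Int).size : Int) + 1) = 1 from by
    simp [PySem.Dict.size_empty]] at hd
  rw [hd]
  dsimp only
  rw [fold_set_map, a_chain _ _ hpre, b_acc]
  simp
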